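-- pv_equiv track=rewrite | github.com/moonshine-ai/moonshine-g2p2 | cmudict_ipa.py | normalize_word_for_lookup
-- ===== SOURCE A (Python) =====
-- def normalize_word_for_lookup(token: str) -> str:
--     """
--     Lowercase *token* and remove leading/trailing characters for which ``str.isalnum()``
--     is false. Used to map surface tokens (e.g. ``Hello,``) to CMUdict keys. Returns
--     an empty string if nothing alphanumeric remains.
--     """
--     s = token.lower().strip()
--     if not s:
--         return ""
--     i, j = 0, len(s)
--     while i < j and not s[i].isalnum():
--         i += 1
--     while i < j and not s[j - 1].isalnum():
--         j -= 1
--     return s[i:j]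
-- ===== SOURCE B (Python) =====
-- def normalize_word_for_lookup(token: str) -> str:
--     """Lowercase and trim non-alphanumeric edge characters: one scan collecting
--     alnum positions, then a single slice (instead of two inward pointer loops)."""
--     s = token.lower().strip()
--     idx = [k for k, c in enumerate(s) if c.isalnum()]
--     if not idx:
--         return ""
--     return s[idx[0]:idx[-1] + 1]
-- ===== Notes on version B (the rewrite author's own statement) =====
-- stated objective: alternative
-- what changed: Replaces the two inward while-loop pointers with one enumerate scan that collects alnum indices followed by a single slice from the first to the last such index.
import Mathlib
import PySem

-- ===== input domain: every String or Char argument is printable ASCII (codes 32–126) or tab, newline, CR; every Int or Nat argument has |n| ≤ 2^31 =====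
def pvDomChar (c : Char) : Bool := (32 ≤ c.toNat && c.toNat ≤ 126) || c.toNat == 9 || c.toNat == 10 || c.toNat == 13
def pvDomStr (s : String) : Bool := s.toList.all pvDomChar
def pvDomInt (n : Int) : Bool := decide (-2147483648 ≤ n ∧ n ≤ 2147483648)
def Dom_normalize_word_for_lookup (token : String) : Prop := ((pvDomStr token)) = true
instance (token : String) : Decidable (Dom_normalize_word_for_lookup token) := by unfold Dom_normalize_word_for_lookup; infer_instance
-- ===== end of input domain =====

-- B replaces A's two inward while-loop pointers by one enumerate scan collecting
-- alnum indices and a single slice (alternative decomposition, same cost).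

-- ===== PORT A =====
-- `while i < j and not s[i].isalnum(): i += 1`  (s[i] is in range whenever read)
def pvALeft (cs : List Char) (i j : Nat) : Nat :=
  if h : i < j ∧ ¬(PySem.Str.isalnum (cs.getD i ' ') = true) then pvALeft cs (i + 1) j else i
termination_by j - i
decreasing_by obtain ⟨h1, -⟩ := h; omega


-- `while i < j and not s[j - 1].isalnum(): j -= 1`
def pvARight (cs : List Char) (i j : Nat) : Nat :=
  if h : i < j ∧ ¬(PySem.Str.isalnum (cs.getD (j - 1) ' ') = true) then pvARight cs i (j - 1) else j
termination_by j - i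
decreasing_by obtain ⟨h1, -⟩ := h; omega


def normalize_word_for_lookup (token : String) : String :=
  let s := PySem.Str.strip (PySem.Str.lower token)
  let cs := s.toList
  if cs = [] then "" else
  let i := pvALeft cs 0 cs.length
  let j := pvARight cs i cs.length
  String.ofList (PySem.List.slice cs (some (i : Int)) (some (j : Int)))

-- ===== PORT B =====
def normalize_word_for_lookup_alt (token : String) : String :=
  let s := PySem.Str.strip (PySem.Str.lower token)
  let cs := s.toList
  -- idx = [k for k, c in enumerate(s) if c.isalnum()]
  let idx := ((PySem.List.enumerate cs).filter (fun kc => PySem.Str.isalnum kc.2)).map (·.1)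
  match idx with
  | [] => ""
  | a :: rest =>
      String.ofList (PySem.List.slice cs (some a) (some ((a :: rest).getLast (by simp) + 1)))

-- ===== PRECONDITION & SPEC =====
def Spec_normalize_word_for_lookup (token : String) (out : String) : Prop := out = normalize_word_for_lookup_alt token
instance (token : String) (out : String) : Decidable (Spec_normalize_word_for_lookup token out) := by unfold Spec_normalize_word_for_lookup; infer_instance

-- ===== CLAIM (what is proved, stated in full; the proofs are below) =====
def Claim_equal_normalize_word_for_lookup : Prop := ∀ (token : String), Dom_normalize_word_for_lookup token → Spec_normalize_word_for_lookup token (normalize_word_for_lookup token)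

-- ===== LEMMAS AND PROOFS =====

-- the list of alnum indices, as a structural recursion (proof-side mirror of B's scan)
def pvJ : List Char → List Nat
  | [] => []
  | c :: cs => if PySem.Str.isalnum c then 0 :: (pvJ cs).map (fun n => n + 1) else (pvJ cs).map (fun n => n + 1)

lemma pv_takeWhile_take {α : Type} (q : α → Bool) (l : List α) (m : Nat) :
    (l.take m).takeWhile q = (l.takeWhile q).take m := by
  induction l generalizing m with
  | nil => simp
  | cons c cs ih =>
    cases m with
    | zero => simp
    | succ m => by_cases h : q c <;> simp [List.takeWhile, h, ih]

lemma pv_len_takeWhile_le {α : Type} (q : α → Bool) (l : List α) :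
    (l.takeWhile q).length ≤ l.length :=
  (l.takeWhile_prefix q).sublist.length_le

-- B's comprehension equals pvJ (shifted by the enumerate start)
lemma pv_idx_eq (cs : List Char) (s : Int) :
    ((PySem.List.enumerate cs s).filter (fun kc => PySem.Str.isalnum kc.2)).map (·.1)
      = (pvJ cs).map (fun n : Nat => (n : Int) + s) := by
  induction cs generalizing s with
  | nil => simp [PySem.List.enumerate, pvJ]
  | cons c cs ih =>
    have hshift :
        ((pvJ cs).map (fun n : Nat => n + 1)).map (fun n : Nat => (n : Int) + s)
          = (pvJ cs).map (fun n : Nat => (n : Int) + (s + 1)) := by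
      rw [List.map_map]
      refine List.map_congr_left ?_
      intro n _
      simp [Function.comp]
      ring
    rw [PySem.List.enumerate_cons]
    by_cases h : PySem.Str.isalnum c
    · rw [List.filter_cons_of_pos (by simpa using h), List.map_cons]
      rw [ih (s + 1)]
      simp only [pvJ, h, if_true, List.map_cons, hshift]
      simp
    · rw [List.filter_cons_of_neg (by simpa using h)]
      rw [ih (s + 1)]
      simp only [pvJ, h, Bool.false_eq_true, if_false, hshift]

lemma pvJ_nil_takeWhile (cs : List Char) (h : pvJ cs = []) :
    cs.takeWhile (fun c => !PySem.Str.isalnum c) = cs := by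
  induction cs with
  | nil => simp
  | cons c cs ih =>
    by_cases hc : PySem.Str.isalnum c
    · rw [pvJ, if_pos hc] at h; exact absurd h (by simp)
    · rw [pvJ, if_neg hc] at h
      rw [List.map_eq_nil_iff] at h
      simp [List.takeWhile, hc, ih h]

lemma pvJ_head (cs : List Char) (a : Nat) (rest : List Nat) (h : pvJ cs = a :: rest) :
    a = (cs.takeWhile (fun c => !PySem.Str.isalnum c)).length := by
  induction cs generalizing a rest with
  | nil => simp [pvJ] at h
  | cons c cs ih =>
    by_cases hc : PySem.Str.isalnum c
    · rw [pvJ, if_pos hc] at h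
      obtain ⟨rfl, -⟩ := List.cons.inj h
      simp [List.takeWhile, hc]
    · rw [pvJ, if_neg hc] at h
      cases hJ : pvJ cs with
      | nil => rw [hJ] at h; simp at h
      | cons a' rest' =>
        rw [hJ] at h
        obtain ⟨rfl, -⟩ := List.cons.inj h
        simp [List.takeWhile, hc, ← ih a' rest' hJ]

lemma pvJ_lt (cs : List Char) (n : Nat) (h : n ∈ pvJ cs) : n < cs.length := by
  induction cs generalizing n with
  | nil => simp [pvJ] at h
  | cons c cs ih =>
    have hstep : ∀ m, m ∈ (pvJ cs).map (fun n : Nat => n + 1) → m < (c :: cs).length := by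
      intro m hm
      obtain ⟨k, hk, rfl⟩ := List.mem_map.1 hm
      have := ih k hk
      simp; omega
    by_cases hc : PySem.Str.isalnum c
    · rw [pvJ, if_pos hc] at h
      rcases List.mem_cons.1 h with rfl | h
      · simp
      · exact hstep n h
    · rw [pvJ, if_neg hc] at h
      exact hstep n h

lemma pvJ_append (l : List Char) (c : Char) :
    pvJ (l ++ [c]) = pvJ l ++ (if PySem.Str.isalnum c then [l.length] else []) := by
  induction l with
  | nil => by_cases h : PySem.Str.isalnum c <;> simp [pvJ, h]
  | cons d l ih =>
    by_cases hd : PySem.Str.isalnum d <;>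
      by_cases h : PySem.Str.isalnum c <;>
      simp [pvJ, hd, h, ih]

lemma pvJ_sorted (cs : List Char) : (pvJ cs).Pairwise (· ≤ ·) := by
  induction cs with
  | nil => simp [pvJ]
  | cons c cs ih =>
    have hmap : ((pvJ cs).map (fun n : Nat => n + 1)).Pairwise (· ≤ ·) :=
      (List.pairwise_map).2 (ih.imp (by omega))
    by_cases hc : PySem.Str.isalnum c
    · rw [pvJ, if_pos hc]
      refine List.pairwise_cons.2 ⟨?_, hmap⟩
      intro n hn
      omega
    · rw [pvJ, if_neg hc]
      exact hmap

lemma pv_head_le_getLast (cs : List Char) (a b : Nat) (rest : List Nat)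
    (h : pvJ cs = a :: rest) (hb : (a :: rest).getLast? = some b) : a ≤ b := by
  have hs := pvJ_sorted cs
  rw [h] at hs
  have hmem : b ∈ a :: rest := List.mem_of_getLast? hb
  rcases List.mem_cons.1 hmem with rfl | hmem
  · omega
  · exact (List.pairwise_cons.1 hs).1 _ hmem

lemma pv_getLast_mem {l : List Nat} {b : Nat} (hb : l.getLast? = some b) : b ∈ l :=
  List.mem_of_getLast? hb

-- trailing-run length determined by the last alnum index
lemma pvQ' (cs : List Char) (b : Nat) (hb : (pvJ cs).getLast? = some b) :
    (cs.reverse.takeWhile (fun c => !PySem.Str.isalnum c)).length = cs.length - 1 - b := by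
  induction cs using List.reverseRecOn generalizing b with
  | nil => simp [pvJ] at hb
  | append_singleton l c ih =>
    rw [pvJ_append] at hb
    by_cases hc : PySem.Str.isalnum c
    · rw [if_pos hc] at hb
      rw [List.getLast?_concat] at hb
      obtain rfl : l.length = b := Option.some.inj hb
      simp [hc]
    · rw [if_neg hc] at hb
      simp only [List.append_nil] at hb
      have hblt : b < l.length := pvJ_lt l b (pv_getLast_mem hb)
      have := ih b hb
      simp [hc, this]
      omega

lemma pvALeft_eq (cs : List Char) (i : Nat) (_hi : i ≤ cs.length) :
    pvALeft cs i cs.length = i + ((cs.drop i).takeWhile (fun c => !PySem.Str.isalnum c)).length := by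
  by_cases h : i < cs.length ∧ ¬(PySem.Str.isalnum (cs.getD i ' ') = true)
  · rw [pvALeft, dif_pos h]
    obtain ⟨h1, h2⟩ := h
    have hget : cs.getD i ' ' = cs[i] := List.getD_eq_getElem cs ' ' h1
    have hd : cs.drop i = cs[i] :: cs.drop (i + 1) := List.drop_eq_getElem_cons h1
    rw [pvALeft_eq cs (i + 1) (by omega), hd]
    rw [hget] at h2
    rw [List.takeWhile_cons_of_pos (by simpa using h2)]
    simp
    omega
  · rw [pvALeft, dif_neg h]
    rcases Nat.lt_or_ge i cs.length with hlt | hge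
    · have h2 : PySem.Str.isalnum (cs.getD i ' ') = true := by tauto
      have hget : cs.getD i ' ' = cs[i] := List.getD_eq_getElem cs ' ' hlt
      have hd : cs.drop i = cs[i] :: cs.drop (i + 1) := List.drop_eq_getElem_cons hlt
      rw [hget] at h2
      rw [hd, List.takeWhile_cons_of_neg (by simpa using h2)]
      simp
    · have : cs.drop i = [] := List.drop_eq_nil_of_le (by omega)
      simp [this]
termination_by cs.length - i
decreasing_by obtain ⟨h1, -⟩ := h; omega


lemma pv_take_window (cs : List Char) (i j : Nat) (h1 : i < j) (hj : j ≤ cs.length) :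
    (cs.take j).drop i = ((cs.take (j - 1)).drop i) ++ [cs[j - 1]'(by omega)] := by
  have hlt : j - 1 < cs.length := by omega
  have hsplit : cs.take j = cs.take (j - 1) ++ [cs[j - 1]] := by
    have hj1 : j - 1 + 1 = j := by omega
    have h' := List.take_add_one (l := cs) (i := j - 1)
    rw [hj1] at h'
    rw [h', List.getElem?_eq_getElem hlt]
    simp
  rw [hsplit, List.drop_append_of_le_length (by simp; omega)]

lemma pvARight_eq (cs : List Char) (i j : Nat) (hij : i ≤ j) (hj : j ≤ cs.length) :
    pvARight cs i j = j - (((cs.take j).drop i).reverse.takeWhile (fun c => !PySem.Str.isalnum c)).length := by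
  by_cases h : i < j ∧ ¬(PySem.Str.isalnum (cs.getD (j - 1) ' ') = true)
  · rw [pvARight, dif_pos h]
    obtain ⟨h1, h2⟩ := h
    have hlt : j - 1 < cs.length := by omega
    have hget : cs.getD (j - 1) ' ' = cs[j - 1] := List.getD_eq_getElem cs ' ' hlt
    rw [hget] at h2
    rw [pvARight_eq cs i (j - 1) (by omega) (by omega), pv_take_window cs i j h1 hj]
    rw [List.reverse_append, List.reverse_singleton, List.singleton_append,
      List.takeWhile_cons_of_pos (by simpa using h2)]
    have hlen : (((cs.take (j - 1)).drop i).reverse.takeWhile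
        (fun c => !PySem.Str.isalnum c)).length ≤ j - 1 - i := by
      have := pv_len_takeWhile_le (fun c => !PySem.Str.isalnum c)
        (((cs.take (j - 1)).drop i).reverse)
      simp at this
      omega
    simp
    omega
  · rw [pvARight, dif_neg h]
    rcases Nat.lt_or_ge i j with hlt | hge
    · have h2 : PySem.Str.isalnum (cs.getD (j - 1) ' ') = true := by tauto
      have hlt' : j - 1 < cs.length := by omega
      have hget : cs.getD (j - 1) ' ' = cs[j - 1] := List.getD_eq_getElem cs ' ' hlt'
      rw [hget] at h2
      rw [pv_take_window cs i j hlt hj, List.reverse_append, List.reverse_singleton,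
        List.singleton_append, List.takeWhile_cons_of_neg (by simpa using h2)]
      simp
    · have : (cs.take j).drop i = [] := List.drop_eq_nil_of_le (by simp; omega)
      simp [this]
termination_by j - i
decreasing_by obtain ⟨h1, -⟩ := h; omega


-- the main fact: A's pointer pair and B's scan produce the same slice
lemma pv_main (token : String) :
    normalize_word_for_lookup token = normalize_word_for_lookup_alt token := by
  unfold normalize_word_for_lookup normalize_word_for_lookup_alt
  dsimp only
  set cs : List Char := (PySem.Str.strip (PySem.Str.lower token)).toList with hcs
  clear_value cs
  have hidx := pv_idx_eq cs 0
  have hidx' : ((PySem.List.enumerate cs 0).filter (fun kc => PySem.Str.isalnum kc.2)).map (·.1)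
      = (pvJ cs).map (fun n : Nat => (n : Int)) := by
    rw [hidx]; simp
  set q : Char → Bool := fun c => !PySem.Str.isalnum c with hq
  have hL : pvALeft cs 0 cs.length = (cs.takeWhile q).length := by
    simpa using pvALeft_eq cs 0 (by omega)
  cases hJ : pvJ cs with
  | nil =>
    rw [hidx', hJ, List.map_nil]
    dsimp only
    have htw : cs.takeWhile q = cs := pvJ_nil_takeWhile cs hJ
    have hLlen : pvALeft cs 0 cs.length = cs.length := by rw [hL, htw]
    have hR : pvARight cs cs.length cs.length = cs.length := by
      rw [pvARight_eq cs cs.length cs.length le_rfl le_rfl]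
      simp [List.drop_eq_nil_of_le]
    by_cases hnil : cs = []
    · simp [hnil]
    · rw [if_neg hnil, hLlen, hR]
      have : PySem.List.slice cs (some ((cs.length : Nat) : Int)) (some ((cs.length : Nat) : Int)) = [] := by
        rw [PySem.List.slice_natCast]; simp
      rw [this]
  | cons a rest =>
    rw [hidx', hJ, List.map_cons]
    dsimp only
    have hnil : cs ≠ [] := by intro h; rw [h] at hJ; simp [pvJ] at hJ
    rw [if_neg hnil]
    have ha : a = (cs.takeWhile q).length := pvJ_head cs a rest hJ
    obtain ⟨b, hb⟩ : ∃ b, (a :: rest).getLast? = some b :=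
      ⟨_, List.getLast?_eq_some_getLast (by simp)⟩
    have hab : a ≤ b := pv_head_le_getLast cs a b rest hJ hb
    have hblt : b < cs.length := by
      apply pvJ_lt cs
      rw [hJ]
      exact pv_getLast_mem hb
    have halen : a ≤ cs.length := by rw [ha]; exact pv_len_takeWhile_le q cs
    have hR : pvARight cs a cs.length = b + 1 := by
      rw [pvARight_eq cs a cs.length (by omega) le_rfl]
      rw [List.take_length]
      rw [List.reverse_drop, pv_takeWhile_take]
      have hfull : (cs.reverse.takeWhile q).length = cs.length - 1 - b := by
        rw [hq]
        exact pvQ' cs b (hJ ▸ hb)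
      rw [List.length_take, hfull]
      omega
    rw [hL, ← ha, hR]
    -- B's bounds: map the getLast through the Int cast
    have h2 : ((a : Int) :: rest.map (fun n : Nat => (n : Int))).getLast? = some ((b : Nat) : Int) := by
      rw [show ((a : Int) :: rest.map (fun n : Nat => (n : Int)))
            = (a :: rest).map (fun n : Nat => (n : Int)) from rfl]
      rw [List.getLast?_map, hb]
      rfl
    have hlast2 : ((a : Int) :: rest.map (fun n : Nat => (n : Int))).getLast (by simp)
        = ((b : Nat) : Int) := by
      have h1 := List.getLast?_eq_some_getLast
        (l := (a : Int) :: rest.map (fun n : Nat => (n : Int))) (by simp)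
      rw [h2] at h1
      exact (Option.some.inj h1).symm
    rw [hlast2]
    have hsum : ((b : Nat) : Int) + 1 = (((b + 1 : Nat)) : Int) := by push_cast; ring
    rw [hsum]

-- ===== VERDICT (by name: the statement is the Claim_ definition above) =====
theorem normalize_word_for_lookup_spec : Claim_equal_normalize_word_for_lookup := by
  unfold Claim_equal_normalize_word_for_lookup Spec_normalize_word_for_lookup
  intro token _
  rw [pv_main token]
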